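-- pv_equiv track=rewrite | github.com/p8ul/python-algorithms | greedy/samesumsubarray/app.py | sub_array_with_equal_sum
-- ===== SOURCE A (Python) =====
-- def sub_array_with_equal_sum(arr):
--     n = len(arr)
--     total_left, count = 0, []
--     for i in range(0, n):
--         total_left += arr[i]  # total_left = [arr[i]+ ... + arr[n]]
--         # find the sum of other elements
--         # first loop given [0, 4, -1, 0, 3] will be
--         # left = [0] right = 4 + (-1) + 0 + 3
--         total_right = 0
--         for j in range(i + 1, n):
--             total_right += arr[j]
--         if total_left == total_right:
--             # found a sub array where right equals left
--             count.append(i + 1)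
--     return count
-- ===== SOURCE B (Python) =====
-- def sub_array_with_equal_sum(arr):
--     total = sum(arr)
--     res = []
--     left = 0
--     for i, x in enumerate(arr):
--         left += x
--         if left == total - left:
--             res.append(i + 1)
--     return res
-- ===== Notes on version B (the rewrite author's own statement) =====
-- stated objective: faster
-- what changed: Replaced the nested suffix-sum rescans by a single pass that precomputes the total sum and keeps a running prefix sum, testing left == total - left.
import Mathlib
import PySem

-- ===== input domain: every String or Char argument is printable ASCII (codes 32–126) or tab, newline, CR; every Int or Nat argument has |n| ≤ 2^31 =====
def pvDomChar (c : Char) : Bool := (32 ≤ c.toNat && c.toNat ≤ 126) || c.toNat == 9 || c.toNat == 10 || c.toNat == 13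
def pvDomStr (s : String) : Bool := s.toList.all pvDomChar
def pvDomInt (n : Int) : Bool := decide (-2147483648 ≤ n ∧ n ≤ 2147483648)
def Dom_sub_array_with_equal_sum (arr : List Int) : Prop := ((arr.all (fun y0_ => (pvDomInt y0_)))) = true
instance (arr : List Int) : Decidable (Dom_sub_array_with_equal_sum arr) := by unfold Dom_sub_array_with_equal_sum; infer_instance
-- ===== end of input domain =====

-- B replaces A's nested suffix-sum rescans by one pass over the list with the precomputed total sum (objective: faster).

-- ===== PORT A =====
-- outer loop 'for i in range(0, n)' with state (total_left, count); inner loop recomputes total_right each time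
def sub_array_with_equal_sum (arr : List Int) : List Int :=
  let n : Int := arr.length
  ((PySem.List.pyRange 0 n 1).foldl
    (fun (st : Int × List Int) i =>
      let tl : Int := st.1 + PySem.List.pyGetD arr i 0
      let tr : Int := (PySem.List.pyRange (i + 1) n 1).foldl
        (fun s j => s + PySem.List.pyGetD arr j 0) 0
      (tl, if tl = tr then st.2 ++ [i + 1] else st.2))
    (0, [])).2

-- ===== PORT B =====
-- total = sum(arr); one pass over enumerate(arr) carrying the running left sum
def sub_array_with_equal_sum_alt (arr : List Int) : List Int :=
  let total : Int := arr.foldl (· + ·) 0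
  ((PySem.List.enumerate arr 0).foldl
    (fun (st : Int × List Int) (p : Int × Int) =>
      let left : Int := st.1 + p.2
      (left, if left = total - left then st.2 ++ [p.1 + 1] else st.2))
    (0, [])).2

-- ===== PRECONDITION & SPEC =====
def Spec_sub_array_with_equal_sum (arr : List Int) (out : List Int) : Prop := out = sub_array_with_equal_sum_alt arr
instance (arr : List Int) (out : List Int) : Decidable (Spec_sub_array_with_equal_sum arr out) := by unfold Spec_sub_array_with_equal_sum; infer_instance

-- ===== CLAIM (what is proved, stated in full; the proofs are below) =====
def Claim_equal_sub_array_with_equal_sum : Prop := ∀ (arr : List Int), Dom_sub_array_with_equal_sum arr → Spec_sub_array_with_equal_sum arr (sub_array_with_equal_sum arr)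

-- ===== LEMMAS AND PROOFS =====

-- A's outer fold over range(0, m): total_left is the prefix sum, and index k is appended
-- exactly when twice the prefix sum of the first k+1 elements equals the total sum.
theorem pv_A_fold (arr : List Int) (m : Nat) (hm : m ≤ arr.length) :
    ((PySem.List.pyRange 0 (m : Int) 1).foldl
      (fun (st : Int × List Int) i =>
        let tl : Int := st.1 + PySem.List.pyGetD arr i 0
        let tr : Int := (PySem.List.pyRange (i + 1) (arr.length : Int) 1).foldl
          (fun s j => s + PySem.List.pyGetD arr j 0) 0
        (tl, if tl = tr then st.2 ++ [i + 1] else st.2))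
      (0, []))
    = ((arr.take m).sum,
       (List.range m).filterMap
         (fun k => if 2 * (arr.take (k + 1)).sum = arr.sum then some ((k : Int) + 1) else none)) := by
  induction m with
  | zero => simp [PySem.List.pyRange_one_eq_nil]
  | succ m ih =>
    have hm' : m ≤ arr.length := Nat.le_of_succ_le hm
    have hlt : m < arr.length := hm
    have hsplit : PySem.List.pyRange 0 ((m + 1 : Nat) : Int) 1
        = PySem.List.pyRange 0 (m : Int) 1 ++ [(m : Int)] := by
      rw [show ((m + 1 : Nat) : Int) = (m : Int) + 1 by push_cast; ring]
      exact PySem.List.pyRange_one_succ_right (by positivity)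
    rw [hsplit, List.foldl_append, ih hm', List.range_succ, List.filterMap_append]
    simp only [List.foldl_cons, List.foldl_nil, List.filterMap_cons, List.filterMap_nil]
    have hget : PySem.List.pyGetD arr (m : Int) 0 = arr[m] := by
      rw [PySem.List.pyGetD_eq_getElem arr 0 (by positivity) (by exact_mod_cast hlt)]
      simp
    have htr : (PySem.List.pyRange ((m : Int) + 1) (arr.length : Int) 1).foldl
        (fun s j => s + PySem.List.pyGetD arr j 0) 0 = (arr.drop (m + 1)).sum := by
      rw [show ((m : Int) + 1) = ((m + 1 : Nat) : Int) by push_cast; ring]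
      rw [PySem.List.foldl_pyRange_pyGetD' arr 0 (fun s j => s + j) 0 (by positivity)]
      rw [Int.toNat_natCast, ← List.sum_eq_foldl]
    have htake : (arr.take (m + 1)).sum = (arr.take m).sum + arr[m] :=
      List.sum_take_succ arr m hlt
    have htotal : (arr.take (m + 1)).sum + (arr.drop (m + 1)).sum = arr.sum :=
      List.sum_take_add_sum_drop arr (m + 1)
    simp only [hget, htr]
    rw [Prod.mk.injEq]
    constructor
    · exact htake.symm
    · have hiff : ((arr.take m).sum + arr[m] = (arr.drop (m + 1)).sum)
          ↔ (2 * (arr.take (m + 1)).sum = arr.sum) := by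
        constructor <;> intro h <;> omega
      by_cases hc : 2 * (arr.take (m + 1)).sum = arr.sum
      · rw [if_pos (hiff.mpr hc), if_pos hc]
      · rw [if_neg (fun h => hc (hiff.mp h)), if_neg hc]; simp

-- B's fold over enumerate(l, s) starting from running sum 'left' and accumulator 'acc'
theorem pv_B_fold (total : Int) (l : List Int) :
    ∀ (s left : Int) (acc : List Int),
    ((PySem.List.enumerate l s).foldl
      (fun (st : Int × List Int) (p : Int × Int) =>
        let lf : Int := st.1 + p.2
        (lf, if lf = total - lf then st.2 ++ [p.1 + 1] else st.2))
      (left, acc))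
    = (left + l.sum,
       acc ++ (List.range l.length).filterMap
         (fun k => if left + (l.take (k + 1)).sum = total - (left + (l.take (k + 1)).sum)
                   then some (s + (k : Int) + 1) else none)) := by
  induction l with
  | nil => intro s left acc; simp [PySem.List.enumerate_nil]
  | cons x xs ih =>
    intro s left acc
    rw [PySem.List.enumerate_cons, List.foldl_cons]
    simp only []
    rw [ih (s + 1) (left + x)]
    rw [List.length_cons, List.range_succ_eq_map, List.filterMap_cons, List.filterMap_map]
    rw [Prod.mk.injEq]
    constructor
    · simp; ring
    · simp only [Function.comp]
      have hmap : List.filterMap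
            (fun k => if left + x + (xs.take (k + 1)).sum = total - (left + x + (xs.take (k + 1)).sum)
                      then some (s + 1 + (k : Int) + 1) else none) (List.range xs.length)
          = List.filterMap
            ((fun k => if left + (((x :: xs).take (k + 1)).sum) = total - (left + (((x :: xs).take (k + 1)).sum))
                      then some (s + (k : Int) + 1) else none) ∘ Nat.succ) (List.range xs.length) := by
        apply List.filterMap_congr
        intro k _
        simp only [Function.comp, List.take_succ_cons, List.sum_cons]
        have h3 : left + (x + (xs.take (k + 1)).sum) = left + x + (xs.take (k + 1)).sum := by ring
        simp only [h3]
        by_cases h2 : left + x + (xs.take (k + 1)).sum = total - (left + x + (xs.take (k + 1)).sum)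
        · rw [if_pos h2, if_pos h2]; congr 1; push_cast; ring
        · rw [if_neg h2, if_neg h2]
      rw [hmap]
      by_cases hc : left + x = total - (left + x)
      · rw [if_pos (by simpa using hc)]
        simp [List.append_assoc]
        rw [if_pos hc]
      · rw [if_neg (by simpa using hc)]
        simp
        rw [if_neg hc]

-- ===== VERDICT (by name: the statement is the Claim_ definition above) =====
theorem sub_array_with_equal_sum_spec : Claim_equal_sub_array_with_equal_sum := by
  intro arr _
  unfold Spec_sub_array_with_equal_sum sub_array_with_equal_sum sub_array_with_equal_sum_alt
  simp only []
  rw [pv_A_fold arr arr.length le_rfl, pv_B_fold (arr.foldl (· + ·) 0) arr 0 0 []]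
  simp only [List.nil_append]
  apply List.filterMap_congr
  intro k hk
  rw [← List.sum_eq_foldl]
  have hiff : (2 * (arr.take (k + 1)).sum = arr.sum)
      ↔ (0 + (arr.take (k + 1)).sum = arr.sum - (0 + (arr.take (k + 1)).sum)) := by
    constructor <;> intro h <;> omega
  by_cases hc : 2 * (arr.take (k + 1)).sum = arr.sum
  · rw [if_pos hc, if_pos (hiff.mp hc)]; congr 1; ring
  · rw [if_neg hc, if_neg (fun h => hc (hiff.mpr h))]
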